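-- pv_equiv track=rewrite | github.com/Rayinlie/Faculdade | Sistemas Operacionais/deadlock.py | request_resources
-- ===== SOURCE A (Python) =====
-- def is_safe_state(processes, available, allocation, max_demand):
--     work = available[:]
--     finish = [False] * len(processes)
--     while True:
--         made_progress = False
--         for i in range(len(processes)):
--             if not finish[i] and all(max_demand[i][j] - allocation[i][j] <= work[j] for j in range(len(work))):
--                 for j in range(len(work)):
--                     work[j] += allocation[i][j]
--                 finish[i] = True
--                 made_progress = True
--                 break
--         if not made_progress:
--             break
--     return all(finish)
--
-- def request_resources(process_id, request, processes, available, allocation, max_demand):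
--     # Simula um pedido de recursos, verificando se é seguro conceder os recursos sem causar um deadlock.
--     if all(request[j] <= max_demand[process_id][j] - allocation[process_id][j] for j in range(len(request))):
--         if all(request[j] <= available[j] for j in range(len(request))):
--             # Faz alterações temporárias para verificar o estado seguro.
--             temp_available = [available[j] - request[j] for j in range(len(available))]
--             temp_allocation = [allocation[process_id][j] + request[j] for j in range(len(request))]
--             temp_allocations = [row[:] for row in allocation]
--             temp_allocations[process_id] = temp_allocation
--             if is_safe_state(processes, temp_available, temp_allocations, max_demand):
--                 # Atualiza o estado real se for seguro.
--                 for j in range(len(request)):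
--                     available[j] -= request[j]
--                     allocation[process_id][j] += request[j]
--                 return True
--     return False
-- ===== SOURCE B (Python) =====
-- def _sweep_pass(work, pending, need, allocation):
--     kept = []
--     for i in pending:
--         if all(n <= w for n, w in zip(need[i], work)):
--             work = [w + a for w, a in zip(work, allocation[i])]
--         else:
--             kept.append(i)
--     return work, kept
--
-- def _all_finish(processes, available, allocation, max_demand):
--     need = [[m - a for m, a in zip(mrow, arow)] for mrow, arow in zip(max_demand, allocation)]
--     work = list(available)
--     pending = list(range(len(processes)))
--     while pending:
--         work, new_pending = _sweep_pass(work, pending, need, allocation)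
--         if len(new_pending) == len(pending):
--             return False
--         pending = new_pending
--     return True
--
-- def request_resources(process_id, request, processes, available, allocation, max_demand):
--     md_row = max_demand[process_id]
--     al_row = allocation[process_id]
--     if any(r > m - a for r, m, a in zip(request, md_row, al_row)):
--         return False
--     if any(r > av for r, av in zip(request, available)):
--         return False
--     temp_alloc = list(allocation)
--     temp_alloc[process_id] = [a + r for a, r in zip(al_row, request)]
--     if not _all_finish(processes, [av - r for av, r in zip(available, request)], temp_alloc, max_demand):
--         return False
--     for j in range(len(request)):
--         available[j] -= request[j]
--         allocation[process_id][j] += request[j]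
--     return True
-- ===== Notes on version B (the rewrite author's own statement) =====
-- stated objective: alternative
-- what changed: The safety check is replaced by the textbook batch-sweep Banker's algorithm: a precomputed need matrix and full forward passes that admit every currently-admissible pending process within one pass (crediting work as the pass goes), looping until a pass admits nobody, instead of A's pick-one-then-restart scan over finish flags; for nonnegative allocation/request vectors admissibility is monotone in work, so the fixed point equals A's.
-- outside the precondition, e.g. on request_resources(0, [-1], [0], [0], [[0]], [[5]]): A returns False, B returns False; on request_resources(0, [1], [0], [1], [[0], []], [[1], []]): A returns True, B returns True
import Mathlib
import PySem

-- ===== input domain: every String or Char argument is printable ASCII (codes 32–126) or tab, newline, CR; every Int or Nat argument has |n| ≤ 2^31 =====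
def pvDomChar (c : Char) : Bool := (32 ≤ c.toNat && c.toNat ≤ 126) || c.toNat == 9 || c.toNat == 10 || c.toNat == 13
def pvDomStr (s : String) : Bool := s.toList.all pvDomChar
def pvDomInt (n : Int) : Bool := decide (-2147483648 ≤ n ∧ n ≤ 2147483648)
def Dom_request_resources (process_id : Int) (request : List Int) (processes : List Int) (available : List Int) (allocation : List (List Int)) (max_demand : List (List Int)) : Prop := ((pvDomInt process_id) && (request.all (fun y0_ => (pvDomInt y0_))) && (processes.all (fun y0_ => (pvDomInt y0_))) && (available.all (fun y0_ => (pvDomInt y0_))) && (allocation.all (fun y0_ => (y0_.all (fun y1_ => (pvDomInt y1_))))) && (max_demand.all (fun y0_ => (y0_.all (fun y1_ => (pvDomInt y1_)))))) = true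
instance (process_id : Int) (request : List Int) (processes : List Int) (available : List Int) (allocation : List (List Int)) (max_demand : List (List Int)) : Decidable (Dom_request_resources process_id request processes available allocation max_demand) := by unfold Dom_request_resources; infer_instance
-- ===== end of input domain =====

-- B replaces A's pick-one-then-restart safety scan by the textbook batch-sweep Banker's check
-- (precomputed need matrix, full passes admitting every admissible pending process); equal on
-- nonnegative banker states (see Pre_), and the equivalence is about the RETURN value
-- (both Pythons perform the same in-place update of available/allocation on success).


-- ===== PORT A =====
-- A's admissibility test: all(max_demand[i][j] - allocation[i][j] <= work[j] for j in range(len(work)))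
def pvCanFinishA (md al work : List Int) : Bool :=
  (List.range work.length).all (fun j => md.getD j 0 - al.getD j 0 ≤ work.getD j 0)

-- A's inner for-loop with break: first unfinished admissible index, if any
def pvFindA (allocation max_demand : List (List Int)) (work : List Int) (finish : List Bool) : Option Nat :=
  (List.range finish.length).find? (fun i =>
    !(finish.getD i false) && pvCanFinishA (max_demand.getD i []) (allocation.getD i []) work)

-- A's while True loop (each iteration finishes one process or stops; fuel len(processes)+1 suffices)
def pvSafeLoopA (allocation max_demand : List (List Int)) : Nat → List Int → List Bool → Bool
  | 0, _, finish => finish.all id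
  | fuel+1, work, finish =>
    match pvFindA allocation max_demand work finish with
    | some i => pvSafeLoopA allocation max_demand fuel
        ((List.range work.length).map (fun j => work.getD j 0 + (allocation.getD i []).getD j 0))
        (finish.set i true)
    | none => finish.all id

def is_safe_state (processes : List Int) (available : List Int) (allocation : List (List Int)) (max_demand : List (List Int)) : Bool :=
  pvSafeLoopA allocation max_demand (processes.length + 1) available (List.replicate processes.length false)

def request_resources (process_id : Int) (request : List Int) (processes : List Int) (available : List Int) (allocation : List (List Int)) (max_demand : List (List Int)) : Bool :=
  -- Python negative-index normalisation for max_demand[process_id] / allocation[process_id]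
  let pidM : Nat := (if process_id < 0 then process_id + max_demand.length else process_id).toNat
  let pidA : Nat := (if process_id < 0 then process_id + allocation.length else process_id).toNat
  if (List.range request.length).all (fun j =>
        request.getD j 0 ≤ (max_demand.getD pidM []).getD j 0 - (allocation.getD pidA []).getD j 0) then
    if (List.range request.length).all (fun j => request.getD j 0 ≤ available.getD j 0) then
      let temp_available := (List.range available.length).map (fun j => available.getD j 0 - request.getD j 0)
      let temp_allocation := (List.range request.length).map (fun j => (allocation.getD pidA []).getD j 0 + request.getD j 0)
      let temp_allocations := allocation.set pidA temp_allocation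
      if is_safe_state processes temp_available temp_allocations max_demand then true else false
    else false
  else false

-- ===== PORT B =====
-- need = [[m - a for m, a in zip(mrow, arow)] for mrow, arow in zip(max_demand, allocation)]
def pvNeed (max_demand allocation : List (List Int)) : List (List Int) :=
  (max_demand.zip allocation).map (fun t => (t.1.zip t.2).map (fun u => u.1 - u.2))

-- B's admissibility test: all(n <= w for n, w in zip(need[i], work))
def pvOkB (need work : List Int) : Bool := (need.zip work).all (fun t => t.1 ≤ t.2)

-- work = [w + a for w, a in zip(work, allocation[i])]
def pvVAdd (work row : List Int) : List Int := (work.zip row).map (fun t => t.1 + t.2)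

-- one forward pass: admit every admissible process as the pass goes, keep the rest in order
def pvPassB (need allocation : List (List Int)) : List Int → List Nat → List Int × List Nat
  | work, [] => (work, [])
  | work, i :: rest =>
    if pvOkB (need.getD i []) work then pvPassB need allocation (pvVAdd work (allocation.getD i [])) rest
    else
      let p := pvPassB need allocation work rest
      (p.1, i :: p.2)

-- while pending: run a pass; if it admitted nobody return False (fuel len(processes)+1 suffices)
def pvLoopB (need allocation : List (List Int)) : Nat → List Int → List Nat → Bool
  | 0, _, pending => pending.isEmpty
  | fuel+1, work, pending =>
    if pending.isEmpty then true
    else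
      let p := pvPassB need allocation work pending
      if p.2.length = pending.length then false
      else pvLoopB need allocation fuel p.1 p.2

def pvAllFinish (processes : List Int) (available : List Int) (allocation : List (List Int)) (max_demand : List (List Int)) : Bool :=
  pvLoopB (pvNeed max_demand allocation) allocation (processes.length + 1) available (List.range processes.length)

def request_resources_alt (process_id : Int) (request : List Int) (processes : List Int) (available : List Int) (allocation : List (List Int)) (max_demand : List (List Int)) : Bool :=
  let pidM : Nat := (if process_id < 0 then process_id + max_demand.length else process_id).toNat
  let pidA : Nat := (if process_id < 0 then process_id + allocation.length else process_id).toNat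
  let mdRow := max_demand.getD pidM []
  let alRow := allocation.getD pidA []
  if (request.zip (mdRow.zip alRow)).any (fun t => t.2.1 - t.2.2 < t.1) then false
  else if (request.zip available).any (fun t => t.2 < t.1) then false
  else if !pvAllFinish processes ((available.zip request).map (fun t => t.1 - t.2))
      (allocation.set pidA ((alRow.zip request).map (fun t => t.1 + t.2))) max_demand then false
  else true

-- ===== PRECONDITION & SPEC =====
-- Python's negative-index normalisation (used only by Pre_ to name the accessed rows)
def pvPid (pid : Int) (len : Nat) : Nat := (if pid < 0 then pid + len else pid).toNat

-- Pre_ admits: a valid Python index into both matrices, and then either (a) the request-validation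
-- guards reject the request early (some in-range component already exceeds need or availability, so
-- both programs return False before touching the rest of the state), or (b) the guards pass on a
-- well-formed NONNEGATIVE banker state (available exactly as long as request, rows at least as long
-- as request, at least as many rows as processes, request and scanned allocation entries ≥ 0).
-- Outside that A raises IndexError, except on some malformed states where an all() short-circuits
-- first (an artefact of evaluation order) — and nonnegativity is excluded because a banker state's
-- resource vectors are nonnegative counts: with negative entries work is not monotone, so which
-- admissible process is admitted first (unspecified by the task) changes the outcome.
def Pre_request_resources (process_id : Int) (request : List Int) (processes : List Int) (available : List Int) (allocation : List (List Int)) (max_demand : List (List Int)) : Prop :=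
  -(allocation.length : Int) ≤ process_id ∧ process_id < allocation.length ∧
  -(max_demand.length : Int) ≤ process_id ∧ process_id < max_demand.length ∧
  ((∃ j, j < request.length ∧
      j < (max_demand.getD (pvPid process_id max_demand.length) []).length ∧
      j < (allocation.getD (pvPid process_id allocation.length) []).length ∧
      (max_demand.getD (pvPid process_id max_demand.length) []).getD j 0
        - (allocation.getD (pvPid process_id allocation.length) []).getD j 0 < request.getD j 0) ∨
    (request.length ≤ (max_demand.getD (pvPid process_id max_demand.length) []).length ∧
     request.length ≤ (allocation.getD (pvPid process_id allocation.length) []).length ∧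
     (∀ j, j < request.length → request.getD j 0 ≤
        (max_demand.getD (pvPid process_id max_demand.length) []).getD j 0
          - (allocation.getD (pvPid process_id allocation.length) []).getD j 0) ∧
     ((∃ j, j < request.length ∧ j < available.length ∧ available.getD j 0 < request.getD j 0) ∨
      ((∀ j, j < request.length → request.getD j 0 ≤ available.getD j 0) ∧
       available.length = request.length ∧
       processes.length ≤ allocation.length ∧ processes.length ≤ max_demand.length ∧
       (∀ row ∈ allocation, request.length ≤ row.length) ∧
       (∀ row ∈ max_demand, request.length ≤ row.length) ∧
       (∀ j, j < request.length → 0 ≤ request.getD j 0) ∧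
       (∀ i, i < processes.length → ∀ j, j < request.length → 0 ≤ (allocation.getD i []).getD j 0)))))
instance (process_id : Int) (request : List Int) (processes : List Int) (available : List Int) (allocation : List (List Int)) (max_demand : List (List Int)) : Decidable (Pre_request_resources process_id request processes available allocation max_demand) := by unfold Pre_request_resources; infer_instance

def pvWitness_request_resources : Int × List Int × List Int × List Int × List (List Int) × List (List Int) :=
  (0, [1], [0], [1], [[0]], [[1]])

def Spec_request_resources (process_id : Int) (request : List Int) (processes : List Int) (available : List Int) (allocation : List (List Int)) (max_demand : List (List Int)) (out : Bool) : Prop := out = request_resources_alt process_id request processes available allocation max_demand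
instance (process_id : Int) (request : List Int) (processes : List Int) (available : List Int) (allocation : List (List Int)) (max_demand : List (List Int)) (out : Bool) : Decidable (Spec_request_resources process_id request processes available allocation max_demand out) := by unfold Spec_request_resources; infer_instance

-- ===== CLAIM (what is proved, stated in full; the proofs are below) =====
def Claim_equal_request_resources : Prop := ∀ (process_id : Int) (request : List Int) (processes : List Int) (available : List Int) (allocation : List (List Int)) (max_demand : List (List Int)), Dom_request_resources process_id request processes available allocation max_demand → Pre_request_resources process_id request processes available allocation max_demand → Spec_request_resources process_id request processes available allocation max_demand (request_resources process_id request processes available allocation max_demand)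

-- ===== LEMMAS AND PROOFS =====

-- ---------- generic list bridges (shared with the wrapper proof) ----------
lemma find?_and_eq_filter_find? {α : Type} (l : List α) (p q : α → Bool) :
    l.find? (fun x => p x && q x) = (l.filter p).find? q := by
  induction l with
  | nil => rfl
  | cons a l ih =>
    by_cases hp : p a = true
    · by_cases hq : q a = true
      · rw [List.find?_cons_of_pos (by simp [hp, hq]), List.filter_cons_of_pos hp,
          List.find?_cons_of_pos hq]
      · rw [List.find?_cons_of_neg (by simp [hp, hq]), List.filter_cons_of_pos hp,
          List.find?_cons_of_neg (by simp [hq]), ih]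
    · rw [List.find?_cons_of_neg (by simp [hp]), List.filter_cons_of_neg (by simp [hp]), ih]

lemma zipAny3_lt_iff (xs ys zs : List Int) :
    ((xs.zip (ys.zip zs)).any (fun t => decide (t.2.1 - t.2.2 < t.1))) = true
      ↔ ∃ j, j < xs.length ∧ j < ys.length ∧ j < zs.length ∧
          ys.getD j 0 - zs.getD j 0 < xs.getD j 0 := by
  rw [List.any_eq_true]
  constructor
  · rintro ⟨t, ht, hp⟩
    obtain ⟨j, hj, rfl⟩ := List.mem_iff_getElem.mp ht
    have h1 : j < xs.length := by simp at hj; omega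
    have h2 : j < ys.length := by simp at hj; omega
    have h3 : j < zs.length := by simp at hj; omega
    refine ⟨j, h1, h2, h3, ?_⟩
    rw [List.getD_eq_getElem xs 0 h1, List.getD_eq_getElem ys 0 h2, List.getD_eq_getElem zs 0 h3]
    simpa [List.getElem_zip] using hp
  · rintro ⟨j, h1, h2, h3, hlt⟩
    have hj : j < (xs.zip (ys.zip zs)).length := by simp; omega
    refine ⟨_, List.getElem_mem hj, ?_⟩
    rw [List.getD_eq_getElem xs 0 h1, List.getD_eq_getElem ys 0 h2, List.getD_eq_getElem zs 0 h3] at hlt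
    simpa [List.getElem_zip] using hlt

lemma zipAny2_lt_iff (xs ys : List Int) :
    ((xs.zip ys).any (fun t => decide (t.2 < t.1))) = true
      ↔ ∃ j, j < xs.length ∧ j < ys.length ∧ ys.getD j 0 < xs.getD j 0 := by
  rw [List.any_eq_true]
  constructor
  · rintro ⟨t, ht, hp⟩
    obtain ⟨j, hj, rfl⟩ := List.mem_iff_getElem.mp ht
    have h1 : j < xs.length := by simp at hj; omega
    have h2 : j < ys.length := by simp at hj; omega
    refine ⟨j, h1, h2, ?_⟩
    rw [List.getD_eq_getElem xs 0 h1, List.getD_eq_getElem ys 0 h2]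
    simpa [List.getElem_zip] using hp
  · rintro ⟨j, h1, h2, hlt⟩
    have hj : j < (xs.zip ys).length := by simp; omega
    refine ⟨_, List.getElem_mem hj, ?_⟩
    rw [List.getD_eq_getElem xs 0 h1, List.getD_eq_getElem ys 0 h2] at hlt
    simpa [List.getElem_zip] using hlt

lemma mapRange_eq_zipMap (f : Int → Int → Int) (xs ys : List Int) (n : Nat)
    (hx : n ≤ xs.length) (hy : n ≤ ys.length) (hmin : n = min xs.length ys.length) :
    (List.range n).map (fun j => f (xs.getD j 0) (ys.getD j 0)) = (xs.zip ys).map (fun t => f t.1 t.2) := by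
  apply List.ext_getElem
  · simp [hmin]
  · intro j h1 h2
    have hj : j < n := by simpa using h1
    simp [List.getElem_zip, List.getD_eq_getElem?_getD,
      List.getElem?_eq_getElem (lt_of_lt_of_le hj hx),
      List.getElem?_eq_getElem (lt_of_lt_of_le hj hy)]

lemma getD_mapRange (f : Nat → Int) (n j : Nat) (hj : j < n) :
    ((List.range n).map f).getD j 0 = f j := by
  rw [List.getD_eq_getElem _ _ (by simpa using hj)]
  simp

lemma erase_middle (i : Nat) (s t : List Nat) (hs : i ∉ s) : (s ++ i :: t).erase i = s ++ t := by
  induction s with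
  | nil => simp [List.erase_cons_head]
  | cons a s ih =>
    have ha : a ≠ i := by rintro rfl; exact hs (List.mem_cons_self ..)
    rw [List.cons_append, List.erase_cons_tail (by simp [ha]), ih (fun h => hs (List.mem_cons_of_mem _ h)),
      List.cons_append]

lemma filter_erase_nodup {α : Type} [DecidableEq α] (p : α → Bool) (i : α) :
    ∀ l : List α, l.Nodup → (l.filter p).erase i = l.filter (fun j => p j && !(j == i)) := by
  intro l
  induction l with
  | nil => intro _; rfl
  | cons a l ih =>
    intro hnd
    obtain ⟨ha, hl⟩ := List.nodup_cons.mp hnd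
    by_cases hp : p a = true
    · by_cases hai : a = i
      · subst hai
        rw [List.filter_cons_of_pos hp, List.erase_cons_head, List.filter_cons]
        simp only [BEq.rfl, Bool.not_true, Bool.and_false, Bool.false_eq_true, if_false]
        exact (List.filter_congr (fun j hj => by
          have hbe : (j == a) = false := by
            simp only [beq_eq_false_iff_ne]; rintro rfl; exact ha hj
          simp [hbe])).symm
      · have hbe : (a == i) = false := by simp [hai]
        rw [List.filter_cons_of_pos hp, List.erase_cons_tail (by simp [hai]), List.filter_cons]
        simp [hbe, hp, ih hl]
    · rw [List.filter_cons_of_neg (by simp [hp]), List.filter_cons]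
      simp [hp, ih hl]

lemma all_id_eq_filter_isEmpty (finish : List Bool) :
    finish.all id = ((List.range finish.length).filter (fun j => !(finish.getD j false))).isEmpty := by
  rw [Bool.eq_iff_iff]
  simp only [List.all_eq_true, id, List.isEmpty_iff, List.filter_eq_nil_iff, List.mem_range]
  constructor
  · intro h j hj
    rw [List.getD_eq_getElem finish false hj]
    simp [h _ (List.getElem_mem hj)]
  · intro h b hb
    obtain ⟨j, hj, rfl⟩ := List.mem_iff_getElem.mp hb
    have := h j hj
    rw [List.getD_eq_getElem finish false hj] at this
    simpa using this

-- ---------- the abstract banker theory: admissibility, elimination sequences, safety ----------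
-- needOK: process i can finish at work vector w (m = number of resource kinds)
def pvNeedOK (al md : List (List Int)) (m : Nat) (w : List Int) (i : Nat) : Prop :=
  ∀ j, j < m → (md.getD i []).getD j 0 - (al.getD i []).getD j 0 ≤ w.getD j 0

-- an elimination sequence: an order in which pending processes can be finished one by one
inductive pvElim (al md : List (List Int)) (m P : Nat) : List Int → List Nat → Prop
  | nil (w : List Int) : pvElim al md m P w []
  | cons (w : List Int) (i : Nat) (l : List Nat) : i < P → pvNeedOK al md m w i →
      pvElim al md m P (pvVAdd w (al.getD i [])) l → pvElim al md m P w (i :: l)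

-- a pending set is safe iff some ordering of it is an elimination sequence
def pvSafe (al md : List (List Int)) (m P : Nat) (w : List Int) (pend : List Nat) : Prop :=
  ∃ l, l.Perm pend ∧ pvElim al md m P w l

-- well-formed nonnegative state: rows long enough and scanned allocation entries nonnegative
def pvGood (al md : List (List Int)) (m P : Nat) : Prop :=
  (∀ i, i < P → m ≤ (al.getD i []).length ∧ m ≤ (md.getD i []).length ∧
    (∀ j, j < m → 0 ≤ (al.getD i []).getD j 0)) ∧ P ≤ al.length ∧ P ≤ md.length

lemma pvVAdd_length (w r : List Int) : (pvVAdd w r).length = min w.length r.length := by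
  simp [pvVAdd]

lemma pvVAdd_getD (w r : List Int) (j : Nat) (hw : j < w.length) (hr : j < r.length) :
    (pvVAdd w r).getD j 0 = w.getD j 0 + r.getD j 0 := by
  have h : j < (pvVAdd w r).length := by rw [pvVAdd_length]; omega
  rw [List.getD_eq_getElem _ _ h, List.getD_eq_getElem _ _ hw, List.getD_eq_getElem _ _ hr]
  simp [pvVAdd, List.getElem_zip]

lemma pvVAdd_len_eq {m : Nat} (w r : List Int) (hw : w.length = m) (hr : m ≤ r.length) :
    (pvVAdd w r).length = m := by rw [pvVAdd_length]; omega

lemma pvNeedOK_mono {al md : List (List Int)} {m : Nat} {w w' : List Int} {i : Nat}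
    (hle : ∀ j, j < m → w.getD j 0 ≤ w'.getD j 0) (h : pvNeedOK al md m w i) :
    pvNeedOK al md m w' i :=
  fun j hj => le_trans (h j hj) (hle j hj)

lemma pvVAdd_ge {al md : List (List Int)} {m P : Nat} (hG : pvGood al md m P)
    {w : List Int} (hw : w.length = m) {i : Nat} (hi : i < P) :
    ∀ j, j < m → w.getD j 0 ≤ (pvVAdd w (al.getD i [])).getD j 0 := by
  intro j hj
  obtain ⟨hal, _, hnn⟩ := hG.1 i hi
  rw [pvVAdd_getD w _ j (by omega) (by omega)]
  have := hnn j hj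
  omega

lemma pvVAdd_comm {m : Nat} (w r1 r2 : List Int) (hw : w.length = m)
    (h1 : m ≤ r1.length) (h2 : m ≤ r2.length) :
    pvVAdd (pvVAdd w r1) r2 = pvVAdd (pvVAdd w r2) r1 := by
  apply List.ext_getElem
  · simp only [pvVAdd_length]; omega
  · intro j hj1 hj2
    simp only [pvVAdd, List.getElem_map, List.getElem_zip]
    ring

-- exchange: if i is admissible now and eliminable somewhere in the sequence, it can go first
lemma pvElim_exchange {al md : List (List Int)} {m P : Nat} (hG : pvGood al md m P) :
    ∀ (l1 l2 : List Nat) (w : List Int) (i : Nat), w.length = m → i < P →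
      pvNeedOK al md m w i → pvElim al md m P w (l1 ++ i :: l2) →
      pvElim al md m P (pvVAdd w (al.getD i [])) (l1 ++ l2) := by
  intro l1
  induction l1 with
  | nil =>
    intro l2 w i hw hi hni hE
    cases hE with
    | cons _ _ _ _ _ hE' => exact hE'
  | cons a l1 ih =>
    intro l2 w i hw hi hni hE
    cases hE with
    | cons _ _ _ ha hna hE' =>
      have hra : m ≤ (al.getD a []).length := (hG.1 a ha).1
      have hri : m ≤ (al.getD i []).length := (hG.1 i hi).1
      have hwa : (pvVAdd w (al.getD a [])).length = m := pvVAdd_len_eq w _ hw hra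
      have hni' : pvNeedOK al md m (pvVAdd w (al.getD a [])) i :=
        pvNeedOK_mono (pvVAdd_ge hG hw ha) hni
      have hE2 := ih l2 (pvVAdd w (al.getD a [])) i hwa hi hni' hE'
      rw [pvVAdd_comm w _ _ hw hra hri] at hE2
      exact pvElim.cons _ a _ ha (pvNeedOK_mono (pvVAdd_ge hG hw hi) hna) hE2

lemma pvSafe_remove {al md : List (List Int)} {m P : Nat} (hG : pvGood al md m P)
    {w : List Int} (hw : w.length = m) {i : Nat} (hi : i < P) (hni : pvNeedOK al md m w i)
    (pre post : List Nat) (h : pvSafe al md m P w (pre ++ i :: post)) :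
    pvSafe al md m P (pvVAdd w (al.getD i [])) (pre ++ post) := by
  obtain ⟨l, hperm, hE⟩ := h
  have hmem : i ∈ l := hperm.mem_iff.mpr (by simp)
  obtain ⟨s, t, rfl⟩ := List.append_of_mem hmem
  refine ⟨s ++ t, ?_, pvElim_exchange hG s t w i hw hi hni hE⟩
  have h1 : (i :: (s ++ t)).Perm (i :: (pre ++ post)) :=
    (List.perm_middle.symm).trans (hperm.trans List.perm_middle)
  exact h1.cons_inv

lemma pvSafe_insert {al md : List (List Int)} {m P : Nat}
    {w : List Int} {i : Nat} (hi : i < P) (hni : pvNeedOK al md m w i)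
    (pre post : List Nat) (h : pvSafe al md m P (pvVAdd w (al.getD i [])) (pre ++ post)) :
    pvSafe al md m P w (pre ++ i :: post) := by
  obtain ⟨l, hperm, hE⟩ := h
  exact ⟨i :: l, (hperm.cons i).trans List.perm_middle.symm, pvElim.cons _ i _ hi hni hE⟩

-- ---------- bridging the two ports' admissibility tests to pvNeedOK ----------
lemma pvCanFinishA_iff {al md : List (List Int)} {m : Nat} {w : List Int} (hw : w.length = m) (i : Nat) :
    pvCanFinishA (md.getD i []) (al.getD i []) w = true ↔ pvNeedOK al md m w i := by
  simp [pvCanFinishA, pvNeedOK, hw, List.all_eq_true, List.mem_range]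

lemma pvNeed_getD {md al : List (List Int)} {i : Nat} (hial : i < al.length) (himd : i < md.length) :
    (pvNeed md al).getD i [] = ((md.getD i []).zip (al.getD i [])).map (fun u => u.1 - u.2) := by
  have h : i < (pvNeed md al).length := by simp [pvNeed]; omega
  rw [List.getD_eq_getElem _ _ h, List.getD_eq_getElem _ _ hial, List.getD_eq_getElem _ _ himd]
  simp [pvNeed, List.getElem_zip]

lemma zipAll_sub_iff (xs ys ws : List Int) (m : Nat)
    (hw : ws.length = m) (hx : m ≤ xs.length) (hy : m ≤ ys.length) :
    ((((xs.zip ys).map (fun u => u.1 - u.2)).zip ws).all (fun t => t.1 ≤ t.2)) = true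
      ↔ ∀ j, j < m → xs.getD j 0 - ys.getD j 0 ≤ ws.getD j 0 := by
  simp only [List.all_eq_true]
  constructor
  · intro h j hj
    have hlen : j < ((((xs.zip ys).map (fun u => u.1 - u.2)).zip ws)).length := by
      simp; omega
    have := h _ (List.getElem_mem hlen)
    rw [List.getD_eq_getElem xs 0 (by omega), List.getD_eq_getElem ys 0 (by omega),
      List.getD_eq_getElem ws 0 (by omega)]
    simp only [List.getElem_zip, List.getElem_map, decide_eq_true_eq] at this
    exact this
  · intro h t ht
    obtain ⟨j, hj, rfl⟩ := List.mem_iff_getElem.mp ht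
    have hjm : j < m := by simp at hj; omega
    have := h j hjm
    rw [List.getD_eq_getElem xs 0 (by omega), List.getD_eq_getElem ys 0 (by omega),
      List.getD_eq_getElem ws 0 (by omega)] at this
    simp only [List.getElem_zip, List.getElem_map, decide_eq_true_eq]
    exact this

lemma pvOkB_iff {al md : List (List Int)} {m P : Nat} (hG : pvGood al md m P)
    {w : List Int} (hw : w.length = m) {i : Nat} (hi : i < P) :
    pvOkB ((pvNeed md al).getD i []) w = true ↔ pvNeedOK al md m w i := by
  obtain ⟨hal, hmd, -⟩ := hG.1 i hi
  have hPa := hG.2.1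
  have hPm := hG.2.2
  rw [pvNeed_getD (by omega) (by omega), pvOkB]
  exact zipAll_sub_iff (md.getD i []) (al.getD i []) w m hw hmd hal

-- ---------- B's pass: basic shape facts ----------
lemma pvPassB_len_le (need al : List (List Int)) :
    ∀ (pend : List Nat) (w : List Int), ((pvPassB need al w pend).2).length ≤ pend.length := by
  intro pend
  induction pend with
  | nil => intro w; simp [pvPassB]
  | cons i rest ih =>
    intro w
    simp only [pvPassB]
    split
    · exact le_trans (ih _) (Nat.le_succ _)
    · simpa using ih w

lemma pvPassB_mem (need al : List (List Int)) :
    ∀ (pend : List Nat) (w : List Int) (x : Nat), x ∈ (pvPassB need al w pend).2 → x ∈ pend := by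
  intro pend
  induction pend with
  | nil => intro w x h; simp [pvPassB] at h
  | cons i rest ih =>
    intro w x h
    simp only [pvPassB] at h
    split at h
    · exact List.mem_cons_of_mem _ (ih _ _ h)
    · rcases List.mem_cons.mp h with h | h
      · simp [h]
      · exact List.mem_cons_of_mem _ (ih _ _ h)

lemma pvPassB_work {al md : List (List Int)} {m P : Nat} (hG : pvGood al md m P) :
    ∀ (pend : List Nat) (w : List Int), (∀ x ∈ pend, x < P) → w.length = m →
      ((pvPassB (pvNeed md al) al w pend).1).length = m ∧
      (∀ j, j < m → w.getD j 0 ≤ ((pvPassB (pvNeed md al) al w pend).1).getD j 0) := by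
  intro pend
  induction pend with
  | nil => intro w _ hw; exact ⟨by simpa [pvPassB], fun j _ => le_refl _⟩
  | cons i rest ih =>
    intro w hb hw
    have hi : i < P := hb i (List.mem_cons_self ..)
    simp only [pvPassB]
    split
    · have hw' : (pvVAdd w (al.getD i [])).length = m := pvVAdd_len_eq w _ hw (hG.1 i hi).1
      obtain ⟨h1, h2⟩ := ih (pvVAdd w (al.getD i [])) (fun x hx => hb x (List.mem_cons_of_mem _ hx)) hw'
      exact ⟨h1, fun j hj => le_trans (pvVAdd_ge hG hw hi j hj) (h2 j hj)⟩
    · simpa using ih w (fun x hx => hb x (List.mem_cons_of_mem _ hx)) hw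

lemma pvPassB_drop {al md : List (List Int)} {m P : Nat} (hG : pvGood al md m P) :
    ∀ (pend : List Nat) (w : List Int), (∀ x ∈ pend, x < P) → w.length = m →
      ∀ i ∈ pend, pvNeedOK al md m w i →
      ((pvPassB (pvNeed md al) al w pend).2).length < pend.length := by
  intro pend
  induction pend with
  | nil => intro w _ _ i h; simp at h
  | cons a rest ih =>
    intro w hb hw i hmem hni
    have ha : a < P := hb a (List.mem_cons_self ..)
    simp only [pvPassB]
    split
    · exact Nat.lt_succ_of_le (pvPassB_len_le _ _ _ _)
    · rename_i hok
      have hia : i ≠ a := by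
        rintro rfl
        exact hok ((pvOkB_iff hG hw ha).mpr hni)
      have hirest : i ∈ rest := by
        rcases List.mem_cons.mp hmem with h | h
        · exact absurd h hia
        · exact h
      have := ih w (fun x hx => hb x (List.mem_cons_of_mem _ hx)) hw i hirest hni
      simpa using Nat.succ_lt_succ this

-- a pass preserves safety in both directions (pre ++ pend tracks the processes kept so far)
lemma pvPassB_safe {al md : List (List Int)} {m P : Nat} (hG : pvGood al md m P) :
    ∀ (pend : List Nat) (w : List Int) (pre : List Nat), (∀ x ∈ pend, x < P) → w.length = m →
      pvSafe al md m P w (pre ++ pend) →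
      pvSafe al md m P (pvPassB (pvNeed md al) al w pend).1 (pre ++ (pvPassB (pvNeed md al) al w pend).2) := by
  intro pend
  induction pend with
  | nil => intro w pre _ _ h; simpa [pvPassB] using h
  | cons i rest ih =>
    intro w pre hb hw h
    have hi : i < P := hb i (List.mem_cons_self ..)
    simp only [pvPassB]
    split
    · rename_i hok
      have hni : pvNeedOK al md m w i := (pvOkB_iff hG hw hi).mp hok
      have h' := pvSafe_remove hG hw hi hni pre rest h
      exact ih (pvVAdd w (al.getD i [])) pre (fun x hx => hb x (List.mem_cons_of_mem _ hx))
        (pvVAdd_len_eq w _ hw (hG.1 i hi).1) h'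
    · have h' : pvSafe al md m P w ((pre ++ [i]) ++ rest) := by
        simpa using h
      have := ih w (pre ++ [i]) (fun x hx => hb x (List.mem_cons_of_mem _ hx)) hw h'
      simpa using this

lemma pvPassB_sound {al md : List (List Int)} {m P : Nat} (hG : pvGood al md m P) :
    ∀ (pend : List Nat) (w : List Int) (pre : List Nat), (∀ x ∈ pend, x < P) → w.length = m →
      pvSafe al md m P (pvPassB (pvNeed md al) al w pend).1 (pre ++ (pvPassB (pvNeed md al) al w pend).2) →
      pvSafe al md m P w (pre ++ pend) := by
  intro pend
  induction pend with
  | nil => intro w pre _ _ h; simpa [pvPassB] using h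
  | cons i rest ih =>
    intro w pre hb hw h
    have hi : i < P := hb i (List.mem_cons_self ..)
    simp only [pvPassB] at h
    split at h
    · rename_i hok
      have hni : pvNeedOK al md m w i := (pvOkB_iff hG hw hi).mp hok
      have h' := ih (pvVAdd w (al.getD i [])) pre (fun x hx => hb x (List.mem_cons_of_mem _ hx))
        (pvVAdd_len_eq w _ hw (hG.1 i hi).1) h
      exact pvSafe_insert hi hni pre rest h'
    · have h' := ih w (pre ++ [i]) (fun x hx => hb x (List.mem_cons_of_mem _ hx)) hw (by simpa using h)
      simpa using h'

-- ---------- B's outer loop computes safety ----------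
lemma pvLoopB_complete {al md : List (List Int)} {m P : Nat} (hG : pvGood al md m P) :
    ∀ (fuel : Nat) (w : List Int) (pend : List Nat), (∀ x ∈ pend, x < P) → w.length = m →
      pend.length ≤ fuel → pvSafe al md m P w pend →
      pvLoopB (pvNeed md al) al fuel w pend = true := by
  intro fuel
  induction fuel with
  | zero =>
    intro w pend _ _ hlen _
    interval_cases h : pend.length
    · simp [pvLoopB, List.length_eq_zero_iff.mp h]
  | succ fuel ih =>
    intro w pend hb hw hlen hS
    simp only [pvLoopB]
    by_cases hemp : pend.isEmpty
    · simp [hemp]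
    · rw [if_neg (by simp [hemp])]
      obtain ⟨l, hperm, hE⟩ := hS
      have hpne : pend ≠ [] := by simpa [List.isEmpty_iff] using hemp
      have hlne : l ≠ [] := by
        intro h; subst h
        exact hpne (hperm.nil_eq).symm
      obtain ⟨h0, l', rfl⟩ := List.exists_cons_of_ne_nil hlne
      cases hE with
      | cons _ _ _ hh0 hn0 hE' =>
        have hmem : h0 ∈ pend := hperm.mem_iff.mp (List.mem_cons_self ..)
        have hdrop := pvPassB_drop hG pend w hb hw h0 hmem hn0
        rw [if_neg (by omega)]
        obtain ⟨hw', -⟩ := pvPassB_work hG pend w hb hw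
        have hS' : pvSafe al md m P w ([] ++ pend) := by
          exact ⟨h0 :: l', hperm.trans (by simp), pvElim.cons _ h0 l' hh0 hn0 hE'⟩
        have := pvPassB_safe hG pend w [] hb hw hS'
        exact ih _ _ (fun x hx => hb x (pvPassB_mem _ _ _ _ _ hx)) hw' (by omega) (by simpa using this)

lemma pvLoopB_sound {al md : List (List Int)} {m P : Nat} (hG : pvGood al md m P) :
    ∀ (fuel : Nat) (w : List Int) (pend : List Nat), (∀ x ∈ pend, x < P) → w.length = m →
      pvLoopB (pvNeed md al) al fuel w pend = true → pvSafe al md m P w pend := by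
  intro fuel
  induction fuel with
  | zero =>
    intro w pend _ _ h
    simp only [pvLoopB, List.isEmpty_iff] at h
    exact h ▸ ⟨[], List.Perm.refl _, pvElim.nil w⟩
  | succ fuel ih =>
    intro w pend hb hw h
    simp only [pvLoopB] at h
    by_cases hemp : pend.isEmpty
    · rw [List.isEmpty_iff] at hemp
      exact hemp ▸ ⟨[], List.Perm.refl _, pvElim.nil w⟩
    · rw [if_neg (by simp [hemp])] at h
      split at h
      · exact absurd h (by simp)
      · obtain ⟨hw', _⟩ := pvPassB_work hG pend w hb hw
        have hS := ih _ _ (fun x hx => hb x (pvPassB_mem _ _ _ _ _ hx)) hw' h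
        have := pvPassB_sound hG pend w [] hb hw (by simpa using hS)
        simpa using this

-- ---------- A's loop computes safety ----------
def pvPendA (finish : List Bool) : List Nat :=
  (List.range finish.length).filter (fun j => !(finish.getD j false))

lemma pvPendA_nodup (finish : List Bool) : (pvPendA finish).Nodup :=
  (List.nodup_range).filter _

lemma pvPendA_set (finish : List Bool) (i : Nat) (_hi : i < finish.length) :
    pvPendA (finish.set i true) = (pvPendA finish).erase i := by
  rw [pvPendA, pvPendA, filter_erase_nodup _ i _ List.nodup_range]
  have : (List.range (finish.set i true).length) = List.range finish.length := by simp
  rw [this]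
  apply List.filter_congr
  intro j hj
  have hjP : j < finish.length := List.mem_range.mp hj
  have hjs : j < (finish.set i true).length := by simp; omega
  rw [List.getD_eq_getElem finish false hjP, List.getD_eq_getElem _ false hjs, List.getElem_set]
  by_cases hji : i = j
  · subst hji; simp
  · have hbe : (j == i) = false := beq_eq_false_iff_ne.mpr (fun h => hji h.symm)
    rw [if_neg hji]
    simp [hbe]

lemma pvFindA_eq_filter (al md : List (List Int)) (w : List Int) (finish : List Bool) :
    pvFindA al md w finish
      = (pvPendA finish).find? (fun i => pvCanFinishA (md.getD i []) (al.getD i []) w) := by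
  rw [pvFindA, pvPendA, ← find?_and_eq_filter_find?]

lemma pvLoopA_sound {al md : List (List Int)} {m P : Nat} (hG : pvGood al md m P) :
    ∀ (fuel : Nat) (w : List Int) (finish : List Bool), finish.length = P → w.length = m →
      pvSafeLoopA al md fuel w finish = true → pvSafe al md m P w (pvPendA finish) := by
  intro fuel
  induction fuel with
  | zero =>
    intro w finish hf hw h
    simp only [pvSafeLoopA] at h
    rw [all_id_eq_filter_isEmpty, List.isEmpty_iff] at h
    rw [pvPendA, h]
    exact ⟨[], List.Perm.refl _, pvElim.nil w⟩
  | succ fuel ih =>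
    intro w finish hf hw h
    cases hF : pvFindA al md w finish with
    | none =>
      simp only [pvSafeLoopA, hF] at h
      rw [all_id_eq_filter_isEmpty, List.isEmpty_iff] at h
      rw [pvPendA, h]
      exact ⟨[], List.Perm.refl _, pvElim.nil w⟩
    | some i =>
      simp only [pvSafeLoopA, hF] at h
      rw [pvFindA_eq_filter] at hF
      have hmem : i ∈ pvPendA finish := List.mem_of_find?_eq_some hF
      have hiP : i < P := by
        have := List.mem_range.mp (List.mem_of_mem_filter hmem)
        omega
      have hif : i < finish.length := by omega
      have hfs := List.find?_some hF
      have hni : pvNeedOK al md m w i := (pvCanFinishA_iff hw i).mp (by simpa using hfs)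
      have hra : m ≤ (al.getD i []).length := (hG.1 i hiP).1
      have hworks : ((List.range w.length).map (fun j => w.getD j 0 + (al.getD i []).getD j 0))
          = pvVAdd w (al.getD i []) := by
        rw [pvVAdd]
        exact mapRange_eq_zipMap (fun a b => a + b) w (al.getD i []) w.length le_rfl
          (by omega) (by omega)
      rw [hworks] at h
      have hS := ih _ _ (by simpa using hf) (pvVAdd_len_eq w _ hw hra) h
      rw [pvPendA_set finish i hif] at hS
      obtain ⟨s, t, hsplit⟩ := List.append_of_mem hmem
      have hnotin : i ∉ s := by
        have hnd : (s ++ i :: t).Nodup := hsplit ▸ pvPendA_nodup finish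
        have := (List.nodup_cons.mp (List.perm_middle.nodup hnd)).1
        intro hin
        exact this (List.mem_append.mpr (Or.inl hin))
      rw [hsplit, erase_middle i s t hnotin] at hS
      rw [hsplit]
      exact pvSafe_insert hiP hni s t hS

lemma pvLoopA_complete {al md : List (List Int)} {m P : Nat} (hG : pvGood al md m P) :
    ∀ (fuel : Nat) (w : List Int) (finish : List Bool), finish.length = P → w.length = m →
      (pvPendA finish).length ≤ fuel → pvSafe al md m P w (pvPendA finish) →
      pvSafeLoopA al md fuel w finish = true := by
  intro fuel
  induction fuel with
  | zero =>
    intro w finish hf hw hlen _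
    simp only [pvSafeLoopA]
    rw [all_id_eq_filter_isEmpty, List.isEmpty_iff]
    have : pvPendA finish = [] := List.length_eq_zero_iff.mp (by omega)
    simpa [pvPendA] using this
  | succ fuel ih =>
    intro w finish hf hw hlen hS
    cases hF : pvFindA al md w finish with
    | none =>
      simp only [pvSafeLoopA, hF]
      rw [all_id_eq_filter_isEmpty, List.isEmpty_iff]
      rw [pvFindA_eq_filter] at hF
      by_cases hpe : pvPendA finish = []
      · simpa [pvPendA] using hpe
      · exfalso
        obtain ⟨l, hperm, hE⟩ := hS
        have hlne : l ≠ [] := by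
          intro h; subst h
          exact hpe (hperm.nil_eq).symm
        obtain ⟨h0, l', rfl⟩ := List.exists_cons_of_ne_nil hlne
        cases hE with
        | cons _ _ _ hh0 hn0 _ =>
          have hmem : h0 ∈ pvPendA finish := hperm.mem_iff.mp (List.mem_cons_self ..)
          have : (pvPendA finish).find?
              (fun i => pvCanFinishA (md.getD i []) (al.getD i []) w) ≠ none := by
            intro hnone
            have := List.find?_eq_none.mp hnone h0 hmem
            exact this ((pvCanFinishA_iff hw h0).mpr hn0)
          exact this hF
    | some i =>
      simp only [pvSafeLoopA, hF]
      rw [pvFindA_eq_filter] at hF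
      have hmem : i ∈ pvPendA finish := List.mem_of_find?_eq_some hF
      have hiP : i < P := by
        have := List.mem_range.mp (List.mem_of_mem_filter hmem)
        omega
      have hif : i < finish.length := by omega
      have hfs := List.find?_some hF
      have hni : pvNeedOK al md m w i := (pvCanFinishA_iff hw i).mp (by simpa using hfs)
      have hra : m ≤ (al.getD i []).length := (hG.1 i hiP).1
      have hworks : ((List.range w.length).map (fun j => w.getD j 0 + (al.getD i []).getD j 0))
          = pvVAdd w (al.getD i []) := by
        rw [pvVAdd]
        exact mapRange_eq_zipMap (fun a b => a + b) w (al.getD i []) w.length le_rfl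
          (by omega) (by omega)
      rw [hworks]
      obtain ⟨s, t, hsplit⟩ := List.append_of_mem hmem
      have hnotin : i ∉ s := by
        have hnd : (s ++ i :: t).Nodup := hsplit ▸ pvPendA_nodup finish
        have := (List.nodup_cons.mp (List.perm_middle.nodup hnd)).1
        intro hin
        exact this (List.mem_append.mpr (Or.inl hin))
      have hS' := pvSafe_remove hG hw hiP hni s t (hsplit ▸ hS)
      apply ih _ _ (by simpa using hf) (pvVAdd_len_eq w _ hw hra)
      · rw [pvPendA_set finish i hif, hsplit, erase_middle i s t hnotin]
        have : (s ++ i :: t).length ≤ fuel + 1 := hsplit ▸ hlen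
        simp at this ⊢
        omega
      · rw [pvPendA_set finish i hif, hsplit, erase_middle i s t hnotin]
        exact hS'

-- ---------- the two safety checks agree on good states ----------
lemma pvPendA_replicate (P : Nat) : pvPendA (List.replicate P false) = List.range P := by
  rw [pvPendA]
  simp only [List.length_replicate]
  apply List.filter_eq_self.mpr
  intro j hj
  have : j < P := List.mem_range.mp hj
  rw [List.getD_eq_getElem _ false (by simpa using this)]
  simp

lemma pvAllFinish_eq_is_safe_state (processes avail : List Int) (al md : List (List Int))
    (hG : pvGood al md avail.length processes.length) :
    pvAllFinish processes avail al md = is_safe_state processes avail al md := by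
  rw [pvAllFinish, is_safe_state, Bool.eq_iff_iff]
  have hb : ∀ x ∈ List.range processes.length, x < processes.length := fun x hx => List.mem_range.mp hx
  constructor
  · intro hB
    have hS := pvLoopB_sound hG _ _ _ hb rfl hB
    apply pvLoopA_complete hG _ _ _ (by simp) rfl
    · rw [pvPendA_replicate]; simp
    · rw [pvPendA_replicate]; exact hS
  · intro hA
    have hS := pvLoopA_sound hG _ _ _ (by simp) rfl hA
    rw [pvPendA_replicate] at hS
    exact pvLoopB_complete hG _ _ _ hb rfl (by simp) hS

-- ---------- the main theorem ----------
theorem request_resources_spec : Claim_equal_request_resources := by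
  intro process_id request processes available allocation max_demand _ hpre
  unfold Pre_request_resources at hpre
  simp only [pvPid] at hpre
  obtain ⟨hA1, hA2, hM1, hM2, hrest⟩ := hpre
  unfold Spec_request_resources request_resources request_resources_alt
  dsimp only
  have hpidM : (if process_id < 0 then process_id + (max_demand.length : Int) else process_id).toNat < max_demand.length := by
    split <;> omega
  have hpidA : (if process_id < 0 then process_id + (allocation.length : Int) else process_id).toNat < allocation.length := by
    split <;> omega
  set pidM := (if process_id < 0 then process_id + (max_demand.length : Int) else process_id).toNat with hMdef
  set pidA := (if process_id < 0 then process_id + (allocation.length : Int) else process_id).toNat with hAdef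
  set n := request.length with hn
  set mdRow := max_demand.getD pidM [] with hmdRdef
  set alRow := allocation.getD pidA [] with halRdef
  rcases hrest with ⟨j, hj, hjm, hja, hlt⟩ | ⟨hmdLen, halLen, hg1, hrest2⟩
  · -- the need-check rejects the request at an in-range component: both return False
    have hb1 : ((List.range n).all fun j => decide (request.getD j 0 ≤ mdRow.getD j 0 - alRow.getD j 0)) = false :=
      List.all_eq_false.mpr ⟨j, List.mem_range.mpr hj, by
        simp only [Bool.not_eq_true, decide_eq_false_iff_not, not_le]; exact hlt⟩
    have hany1 : ((request.zip (mdRow.zip alRow)).any fun t => decide (t.2.1 - t.2.2 < t.1)) = true :=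
      (zipAny3_lt_iff request mdRow alRow).mpr ⟨j, hj, hjm, hja, hlt⟩
    rw [hb1, hany1]
    simp
  · -- the need-check passes in full
    have hb1 : ((List.range n).all fun j => decide (request.getD j 0 ≤ mdRow.getD j 0 - alRow.getD j 0)) = true := by
      simp only [List.all_eq_true, List.mem_range, decide_eq_true_eq]
      exact hg1
    have hany1 : ((request.zip (mdRow.zip alRow)).any fun t => decide (t.2.1 - t.2.2 < t.1)) = false := by
      cases h : ((request.zip (mdRow.zip alRow)).any fun t => decide (t.2.1 - t.2.2 < t.1)) with
      | false => rfl
      | true =>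
        obtain ⟨k, hk1, _, _, hklt⟩ := (zipAny3_lt_iff request mdRow alRow).mp h
        exact absurd (hg1 k hk1) (not_le.mpr hklt)
    rcases hrest2 with ⟨j, hj, hjav, hlt⟩ | ⟨hg2, hlen, hPa, hPm, hrA, hrM, hnnR, hnnA⟩
    · -- the availability check rejects at an in-range component: both return False
      have hb2 : ((List.range n).all fun j => decide (request.getD j 0 ≤ available.getD j 0)) = false :=
        List.all_eq_false.mpr ⟨j, List.mem_range.mpr hj, by
          simp only [Bool.not_eq_true, decide_eq_false_iff_not, not_le]; exact hlt⟩
      have hany2 : ((request.zip available).any fun t => decide (t.2 < t.1)) = true :=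
        (zipAny2_lt_iff request available).mpr ⟨j, hj, hjav, hlt⟩
      rw [hb1, hb2, hany1, hany2]
      simp
    · -- both checks pass on a well-formed nonnegative state: the two safety checks agree
      have hb2 : ((List.range n).all fun j => decide (request.getD j 0 ≤ available.getD j 0)) = true := by
        simp only [List.all_eq_true, List.mem_range, decide_eq_true_eq]
        exact hg2
      have hany2 : ((request.zip available).any fun t => decide (t.2 < t.1)) = false := by
        cases h : ((request.zip available).any fun t => decide (t.2 < t.1)) with
        | false => rfl
        | true =>
          obtain ⟨k, hk1, _, hklt⟩ := (zipAny2_lt_iff request available).mp h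
          exact absurd (hg2 k hk1) (not_le.mpr hklt)
      rw [hb1, hb2, hany1, hany2]
      simp only [Bool.false_eq_true, if_false, if_true]
      have htav : ((available.zip request).map fun t => t.1 - t.2)
          = (List.range available.length).map (fun j => available.getD j 0 - request.getD j 0) := by
        rw [mapRange_eq_zipMap (fun a r => a - r) available request available.length le_rfl
          (le_of_eq hlen)
          (by rw [hlen, ← hn]; exact (Nat.min_self n).symm)]
      have htal : ((alRow.zip request).map fun t => t.1 + t.2)
          = (List.range n).map (fun j => alRow.getD j 0 + request.getD j 0) := by
        rw [mapRange_eq_zipMap (fun a r => a + r) alRow request n halLen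
          (le_of_eq hn)
          (by rw [← hn]; exact (Nat.min_eq_right halLen).symm)]
      rw [htav, htal]
      set tempAv := (List.range available.length).map (fun j => available.getD j 0 - request.getD j 0) with htavd
      set tempRow := (List.range n).map (fun j => alRow.getD j 0 + request.getD j 0) with htrd
      set al' := allocation.set pidA tempRow with hald
      have htavlen : tempAv.length = n := by simp [htavd, hlen]
      have hG : pvGood al' max_demand tempAv.length processes.length := by
        rw [htavlen]
        refine ⟨?_, by simp [hald]; omega, by omega⟩
        intro i hi
        have hial : i < allocation.length := by omega
        have hrowA' : (al'.getD i []).length = if i = pidA then n else (allocation.getD i []).length := by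
          rw [hald, List.getD_eq_getElem _ [] (by simpa using hial), List.getElem_set]
          by_cases hip : pidA = i
          · rw [if_pos hip, if_pos hip.symm]
            simp [htrd]
          · rw [if_neg hip, if_neg (fun h => hip h.symm), List.getD_eq_getElem _ [] hial]
        refine ⟨?_, ?_, ?_⟩
        · rw [hrowA']
          split
          · exact le_rfl
          · rw [List.getD_eq_getElem allocation [] hial]
            exact hrA _ (List.getElem_mem hial)
        · rw [List.getD_eq_getElem max_demand [] (by omega)]
          exact hrM _ (List.getElem_mem (by omega))
        · intro j hj
          have hgd : al'.getD i [] = if i = pidA then tempRow else allocation.getD i [] := by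
            rw [hald, List.getD_eq_getElem _ [] (by simpa using hial), List.getElem_set]
            by_cases hip : pidA = i
            · rw [if_pos hip, if_pos hip.symm]
            · rw [if_neg hip, if_neg (fun h => hip h.symm), List.getD_eq_getElem _ [] hial]
          rw [hgd]
          by_cases hip : i = pidA
          · rw [if_pos hip]
            rw [htrd, getD_mapRange _ n j hj]
            have h1 : 0 ≤ alRow.getD j 0 := by
              rw [halRdef]
              have := hnnA pidA (by omega) j hj
              exact this
            have h2 : 0 ≤ request.getD j 0 := hnnR j hj
            omega
          · rw [if_neg hip]
            exact hnnA i hi j hj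
      have hsafe := pvAllFinish_eq_is_safe_state processes tempAv al' max_demand hG
      rw [hsafe]
      cases is_safe_state processes tempAv al' max_demand <;> simp
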